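-- pv_equiv track=rewrite | github.com/MerelVanEssen/adventOfCode | 2025/03.py | search_biggest_combination
-- ===== SOURCE A (Python) =====
-- def search_biggest_combination(line, keep):
-- 	to_remove = len(line) - keep
-- 	stack = []
-- 	for n in line:
-- 		while to_remove > 0 and stack and stack[-1] < n:
-- 			stack.pop()
-- 			to_remove -= 1
-- 		stack.append(n)
-- 	return int(''.join(stack[:keep]))
-- ===== SOURCE B (Python) =====
-- def search_biggest_combination(line, keep):
-- 	n = len(line)
-- 	target = keep if keep < n else n
-- 	result = []
-- 	rest = line
-- 	t = target
-- 	while t > 0: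
-- 		window = rest[:len(rest) - (t - 1)]
-- 		best_i, best_v = 0, window[0]
-- 		for j, v in enumerate(window[1:], 1):
-- 			if v > best_v:
-- 				best_i, best_v = j, v
-- 		result.append(best_v)
-- 		rest = rest[best_i + 1:]
-- 		t -= 1
-- 	return int(''.join(result))
-- ===== Notes on version B (the rewrite author's own statement) =====
-- stated objective: alternative
-- what changed: Replaced the single-pass monotonic stack (pop while smaller, budget of removals) by repeated greedy selection: for each output position pick the first maximum of the currently allowed window and continue after it.
-- outside the precondition, e.g. on search_biggest_combination(['2', '1'], -1): A returns 2, B raises ValueError; on search_biggest_combination([' 7', '5'], 1): A returns 5, B returns 5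
import Mathlib
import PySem

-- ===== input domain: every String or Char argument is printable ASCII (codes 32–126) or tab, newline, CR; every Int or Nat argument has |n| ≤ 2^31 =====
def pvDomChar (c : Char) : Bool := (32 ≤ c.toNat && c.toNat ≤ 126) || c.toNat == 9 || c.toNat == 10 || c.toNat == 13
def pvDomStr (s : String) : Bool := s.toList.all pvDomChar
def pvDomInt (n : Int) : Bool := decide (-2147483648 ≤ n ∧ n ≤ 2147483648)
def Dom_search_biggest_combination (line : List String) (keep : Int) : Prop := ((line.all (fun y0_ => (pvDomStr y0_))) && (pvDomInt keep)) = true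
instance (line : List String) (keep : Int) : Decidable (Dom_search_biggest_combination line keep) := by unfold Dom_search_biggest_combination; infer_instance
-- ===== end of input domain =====

-- B replaces A's single-pass monotonic stack by repeated greedy window-max selection (same results, similar cost).


-- ===== PORT A =====
-- the stack is kept TOP-FIRST (head = Python's stack[-1]); Python's stack list is stack.reverse
-- 'while to_remove > 0 and stack and stack[-1] < n: stack.pop(); to_remove -= 1'
def pvPopLoop : List String → Int → String → List String × Int
  | [], tr, _ => ([], tr)
  | t :: rest, tr, n => if tr > 0 ∧ t < n then pvPopLoop rest (tr - 1) n else (t :: rest, tr)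

-- one iteration of 'for n in line': run the while-loop, then 'stack.append(n)'
def pvStepA (acc : List String × Int) (n : String) : List String × Int :=
  ((pvPopLoop acc.1 acc.2 n).1.cons n, (pvPopLoop acc.1 acc.2 n).2)

def search_biggest_combination (line : List String) (keep : Int) : Int :=
  let to_remove : Int := PySem.List.len line - keep
  let res := line.foldl pvStepA ([], to_remove)
  -- stack[:keep] on the in-order stack, i.e. on res.1.reverse
  let kept := PySem.List.slice res.1.reverse none (some keep)
  -- int(''.join(kept)); int() raises (none) outside Pre_, where the result value is not claimed
  (PySem.Int.ofStr? (PySem.Str.join "" kept)).getD 0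

-- ===== PORT B =====
-- 'if v > best_v: best_i, best_v = j, v' over enumerate(window[1:], 1)
def pvBestStep (acc : Int × String) (p : Int × String) : Int × String :=
  if acc.2 < p.2 then p else acc

-- the 'while t > 0' loop of B: window = rest[:len(rest)-(t-1)] (the bound is ≥ 1 on every
-- call the entry point makes, since t ≤ len(rest) is invariant there; Nat subtraction is exact then)
def pvGo : List String → Nat → List String
  | _, 0 => []
  | rest, t + 1 =>
    match rest.take (rest.length - t) with
    | [] => []   -- unreachable from the entry point (the window is nonempty when t < len(rest))
    | x :: xs =>
      let best := (PySem.List.enumerate xs 1).foldl pvBestStep ((0 : Int), x)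
      best.2 :: pvGo (PySem.List.slice rest (some (best.1 + 1)) none) t

def search_biggest_combination_alt (line : List String) (keep : Int) : Int :=
  let n := line.length
  let target : Nat := if keep < (n : Int) then keep.toNat else n   -- min(keep, n); < 0 becomes 0 = empty loop, as in Python
  let result := pvGo line target
  (PySem.Int.ofStr? (PySem.Str.join "" result)).getD 0

-- ===== PRECONDITION & SPEC =====
-- Pre_ excludes keep ≤ 0 and the empty line (A raises int('') there or returns from a negative slice where B raises),
-- and requires that int(''.join(...)) provably succeeds: either every element is a digit string, or
-- keep ≥ len(line) and the whole concatenation parses; inputs with keep < len(line) and non-digit elements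
-- whose joined selection happens to parse are excluded although A returns there (B returns the same value there).
def Pre_search_biggest_combination (line : List String) (keep : Int) : Prop :=
  line ≠ [] ∧ 1 ≤ keep ∧
    ((∀ s ∈ line, PySem.Str.strIsdigit s = true) ∨
      ((line.length : Int) ≤ keep ∧ (PySem.Int.ofStr? (PySem.Str.join "" line)).isSome = true))
instance (line : List String) (keep : Int) : Decidable (Pre_search_biggest_combination line keep) := by
  unfold Pre_search_biggest_combination; infer_instance

def pvWitness_search_biggest_combination : List String × Int := (["3", "1", "4", "1", "5"], 3)

def Spec_search_biggest_combination (line : List String) (keep : Int) (out : Int) : Prop := out = search_biggest_combination_alt line keep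
instance (line : List String) (keep : Int) (out : Int) : Decidable (Spec_search_biggest_combination line keep out) := by unfold Spec_search_biggest_combination; infer_instance

-- ===== CLAIM (what is proved, stated in full; the proofs are below) =====
def Claim_equal_search_biggest_combination : Prop := ∀ (line : List String) (keep : Int), Dom_search_biggest_combination line keep → Pre_search_biggest_combination line keep → Spec_search_biggest_combination line keep (search_biggest_combination line keep)

-- ===== LEMMAS AND PROOFS =====

-- no budget: the pop loop and hence the whole fold do nothing but push
theorem pvPopLoop_nonpos (s : List String) (tr : Int) (n : String) (h : tr ≤ 0) :
    pvPopLoop s tr n = (s, tr) := by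
  cases s with
  | nil => rfl
  | cons t rest => rw [pvPopLoop, if_neg]; omega

theorem foldA_nonpos (xs : List String) (s : List String) (tr : Int) (h : tr ≤ 0) :
    xs.foldl pvStepA (s, tr) = (xs.reverse ++ s, tr) := by
  induction xs generalizing s with
  | nil => simp
  | cons x xs ih =>
      simp only [List.foldl_cons, pvStepA, pvPopLoop_nonpos _ _ _ h]
      rw [ih (x :: s)]; simp

-- shape of one pop loop: it drops some prefix of the (top-first) stack, one budget unit each
theorem pvPopLoop_shape (s : List String) (tr : Int) (n : String) :
    ∃ k : Nat, k ≤ s.length ∧ pvPopLoop s tr n = (s.drop k, tr - k) := by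
  induction s generalizing tr with
  | nil => exact ⟨0, by simp [pvPopLoop]⟩
  | cons t rest ih =>
      by_cases h : tr > 0 ∧ t < n
      · obtain ⟨k, hk, he⟩ := ih (tr - 1)
        refine ⟨k + 1, by simp; omega, ?_⟩
        rw [pvPopLoop, if_pos h, he, List.drop_succ_cons]
        congr 1
        push_cast
        ring
      · exact ⟨0, by simp, by rw [pvPopLoop, if_neg h]; simp⟩

-- shape of the fold: some p elements popped in total, the rest of the input pushed
theorem foldA_shape (xs : List String) (s : List String) (tr : Int) :
    ∃ p : Nat, (xs.foldl pvStepA (s, tr)).2 = tr - p ∧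
      (xs.foldl pvStepA (s, tr)).1.length + p = s.length + xs.length ∧
      (∀ y ∈ (xs.foldl pvStepA (s, tr)).1, y ∈ s ∨ y ∈ xs) := by
  induction xs generalizing s tr with
  | nil => exact ⟨0, by simp⟩
  | cons x xs ih =>
      obtain ⟨k, hk, he⟩ := pvPopLoop_shape s tr x
      obtain ⟨p, h2, h1, hm⟩ := ih (x :: s.drop k) (tr - k)
      refine ⟨p + k, ?_, ?_, ?_⟩
      · simp only [List.foldl_cons, pvStepA, he]; rw [h2]; push_cast; ring
      · simp only [List.foldl_cons, pvStepA, he]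
        simp only [List.length_cons, List.length_drop] at h1 ⊢
        omega
      · intro y hy
        simp only [List.foldl_cons, pvStepA, he] at hy
        rcases hm y hy with h | h
        · rcases List.mem_cons.mp h with h | h
          · right; simp [h]
          · left; exact List.mem_of_mem_drop h
        · right; simp [h]

-- pop past everything: if every stack entry is < n and the budget suffices, the stack empties
theorem pvPopLoop_all (s : List String) (tr : Int) (n : String)
    (hlt : ∀ y ∈ s, y < n) (hb : (s.length : Int) ≤ tr) :
    pvPopLoop s tr n = ([], tr - s.length) := by
  induction s generalizing tr with
  | nil => simp [pvPopLoop]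
  | cons t rest ih =>
      have h1 : tr > 0 ∧ t < n := ⟨by simp at hb; omega, hlt t (by simp)⟩
      rw [pvPopLoop, if_pos h1, ih (tr - 1) (fun y hy => hlt y (List.mem_cons_of_mem _ hy)) (by simp at hb ⊢; omega)]
      congr 1
      simp
      ring

-- a bottom element that is never popped: one pop loop
theorem pvPopLoop_bottom (s : List String) (x : String) (tr : Int) (n : String)
    (h : tr ≤ (s.length : Int) ∨ ¬ x < n) :
    pvPopLoop (s ++ [x]) tr n = ((pvPopLoop s tr n).1 ++ [x], (pvPopLoop s tr n).2) := by
  induction s generalizing tr with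
  | nil =>
      have hcond : ¬ (tr > 0 ∧ x < n) := by
        rcases h with h | h
        · simp at h; omega
        · tauto
      simp only [List.nil_append, pvPopLoop, if_neg hcond]
  | cons t rest ih =>
      by_cases h1 : tr > 0 ∧ t < n
      · simp only [List.cons_append, pvPopLoop, if_pos h1]
        refine ih (tr - 1) ?_
        rcases h with h | h
        · left; simp at h ⊢; omega
        · right; exact h
      · simp only [List.cons_append]
        rw [pvPopLoop, pvPopLoop, if_neg h1, if_neg h1]
        simp

-- a bottom element that is never popped: the whole fold (H: when the budget could reach it, it is not smaller)
theorem foldA_bottom (ys : List String) (s : List String) (x : String) (tr : Int)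
    (H : ∀ j : Nat, (hj : j < ys.length) → tr ≤ (s.length : Int) + j ∨ ¬ x < ys[j]) :
    ys.foldl pvStepA (s ++ [x], tr) =
      ((ys.foldl pvStepA (s, tr)).1 ++ [x], (ys.foldl pvStepA (s, tr)).2) := by
  induction ys generalizing s tr with
  | nil => simp
  | cons y ys ih =>
      obtain ⟨k, hk, he⟩ := pvPopLoop_shape s tr y
      have h0 : tr ≤ (s.length : Int) ∨ ¬ x < y := by
        have := H 0 (by simp); simpa using this
      simp only [List.foldl_cons, pvStepA, pvPopLoop_bottom s x tr y h0, he]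
      rw [← List.cons_append]
      refine ih (y :: s.drop k) (tr - k) (fun j hj => ?_)
      rcases H (j + 1) (by simpa using hj) with h | h
      · left; simp only [List.length_cons, List.length_drop]; push_cast; omega
      · right; simpa using h

-- first-argmax specification of B's inner scan
theorem bestScan_spec (xs : List String) (i b0 : Int) (v0 : String) (hb : b0 < i) :
    ((PySem.List.enumerate xs i).foldl pvBestStep (b0, v0) ∈ (b0, v0) :: PySem.List.enumerate xs i) ∧
    b0 ≤ ((PySem.List.enumerate xs i).foldl pvBestStep (b0, v0)).1 ∧
    (∀ p ∈ (b0, v0) :: PySem.List.enumerate xs i,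
      (p.1 < ((PySem.List.enumerate xs i).foldl pvBestStep (b0, v0)).1 →
        p.2 < ((PySem.List.enumerate xs i).foldl pvBestStep (b0, v0)).2) ∧
      ¬ ((PySem.List.enumerate xs i).foldl pvBestStep (b0, v0)).2 < p.2) := by
  induction xs generalizing i b0 v0 with
  | nil =>
      refine ⟨by simp [PySem.List.enumerate_nil], le_rfl, ?_⟩
      intro p hp
      simp [PySem.List.enumerate_nil] at hp
      subst hp; simp
  | cons y ys ih =>
      rw [PySem.List.enumerate_cons]
      by_cases hc : v0 < y
      · obtain ⟨hm, hle, hp⟩ := ih (i + 1) i y (by omega)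
        have hstep : ((i, y) :: PySem.List.enumerate ys (i + 1)).foldl pvBestStep (b0, v0) =
            (PySem.List.enumerate ys (i + 1)).foldl pvBestStep (i, y) := by
          simp [pvBestStep, hc]
        rw [hstep]
        refine ⟨?_, by omega, ?_⟩
        · rcases List.mem_cons.mp hm with h | h
          · rw [h]; simp
          · simp [h]
        · intro p hp2
          rcases List.mem_cons.mp hp2 with h | h
          · subst h
            have h2 := (hp (i, y) (by simp)).2
            refine ⟨fun _ => lt_of_lt_of_le hc (not_lt.mp h2), fun hcon => h2 (lt_trans hcon hc)⟩
          · exact hp p (by simpa using h)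
      · obtain ⟨hm, hle, hp⟩ := ih (i + 1) b0 v0 (by omega)
        have hstep : ((i, y) :: PySem.List.enumerate ys (i + 1)).foldl pvBestStep (b0, v0) =
            (PySem.List.enumerate ys (i + 1)).foldl pvBestStep (b0, v0) := by
          simp [pvBestStep, hc]
        rw [hstep]
        refine ⟨?_, hle, ?_⟩
        · rcases List.mem_cons.mp hm with h | h
          · rw [h]; simp
          · simp [h]
        · intro p hp2
          rcases List.mem_cons.mp hp2 with h | h
          · exact hp p (by simp [h])
          · rcases List.mem_cons.mp h with h | h
            · subst h
              have hv0 := (hp (b0, v0) (by simp)).2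
              refine ⟨fun hlt => ?_, fun hcon => hv0 (lt_of_lt_of_le hcon (not_lt.mp hc))⟩
              have hstrict := (hp (b0, v0) (by simp)).1 (lt_trans hb hlt)
              exact lt_of_le_of_lt (not_lt.mp hc) hstrict
            · exact hp p (by simp [h])

-- index form of the scan spec, over the whole window w = x :: xs
theorem bestScan_window (x : String) (xs : List String) :
    ∃ (b : Nat) (hb : b < (x :: xs).length),
      ((PySem.List.enumerate xs 1).foldl pvBestStep ((0 : Int), x)).1 = (b : Int) ∧
      (x :: xs)[b] = ((PySem.List.enumerate xs 1).foldl pvBestStep ((0 : Int), x)).2 ∧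
      (∀ j : Nat, (hj : j < (x :: xs).length) →
        (j < b → (x :: xs)[j] < ((PySem.List.enumerate xs 1).foldl pvBestStep ((0 : Int), x)).2) ∧
        ¬ ((PySem.List.enumerate xs 1).foldl pvBestStep ((0 : Int), x)).2 < (x :: xs)[j]) := by
  obtain ⟨hm, hnn, hp⟩ := bestScan_spec xs 1 0 x (by omega)
  have hmem : ∀ p ∈ ((0 : Int), x) :: PySem.List.enumerate xs 1,
      ∃ (b : Nat) (h : b < (x :: xs).length), p.1 = (b : Int) ∧ (x :: xs)[b] = p.2 := by
    intro p hp2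
    rcases List.mem_cons.mp hp2 with h | h
    · subst h; exact ⟨0, by simp, by simp⟩
    · rw [PySem.List.mem_enumerate_iff] at h
      obtain ⟨k, hk, he⟩ := h
      subst he
      exact ⟨k + 1, by simpa using hk, by push_cast; ring_nf, by simp⟩
  obtain ⟨b, hblt, hb1, hb2⟩ := hmem _ hm
  refine ⟨b, hblt, hb1, hb2, fun j hj => ?_⟩
  have hjmem : (((j : Int), (x :: xs)[j]) : Int × String) ∈ ((0 : Int), x) :: PySem.List.enumerate xs 1 := by
    cases j with
    | zero => simp
    | succ k =>
        refine List.mem_cons.mpr (Or.inr ?_)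
        rw [PySem.List.mem_enumerate_iff]
        refine ⟨k, by simpa using hj, ?_⟩
        rw [Prod.ext_iff]
        exact ⟨by push_cast; ring, by simp⟩
  have := hp _ hjmem
  rw [hb1] at this
  exact ⟨fun hlt => this.1 (show ((j : Int)) < (b : Int) by exact_mod_cast hlt), this.2⟩

-- MAIN LEMMA: the stack run with budget len - k, truncated to k, equals the greedy selection of k
theorem main_lemma (k : Nat) (l : List String) (hk : k ≤ l.length) :
    (l.foldl pvStepA ([], ((l.length - k : Nat) : Int))).1.reverse.take k = pvGo l k := by
  induction k generalizing l with
  | zero => simp [pvGo]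
  | succ k ih =>
    have hr1 : l.length - k = (l.length - (k + 1)) + 1 := by omega
    set r : Nat := l.length - (k + 1) with hr
    have hwne : l.take (l.length - k) ≠ [] := by
      intro hcon
      rcases List.take_eq_nil_iff.mp hcon with h | h
      · omega
      · rw [h] at hk; simp at hk
    obtain ⟨x, xs, hw⟩ := List.exists_cons_of_ne_nil hwne
    obtain ⟨b, hblt, hb1, hb2, hspec⟩ := bestScan_window x xs
    have hwlen : (x :: xs).length = r + 1 := by
      rw [← hw, List.length_take]; omega
    have hbr : b ≤ r := by omega
    have hbl : b < l.length := by omega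
    -- bridge between window getElem and list getElem
    have hwl : ∀ (j : Nat) (hj : j < r + 1),
        l[j]'(by omega) = (x :: xs)[j]'(by omega) := by
      intro j hj
      have h2 : l[j]? = (x :: xs)[j]? := by
        rw [← hw, List.getElem?_take_of_lt (by omega)]
      exact Option.some.inj (by rw [← List.getElem?_eq_getElem, ← List.getElem?_eq_getElem, h2])
    have hvb : l[b]'hbl = ((PySem.List.enumerate xs 1).foldl pvBestStep ((0 : Int), x)).2 := by
      rw [hwl b (by omega), hb2]
    -- run over the prefix before the chosen index
    obtain ⟨p, hp2, hp1, hpm⟩ := foldA_shape (l.take b) [] ((r : Nat) : Int)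
    have hplen : ((l.take b).foldl pvStepA ([], ((r : Nat) : Int))).1.length + p = b := by
      rw [List.length_take] at hp1; simpa [Nat.min_eq_left (le_of_lt hbl)] using hp1
    have hpb : p ≤ b := by omega
    -- processing the chosen element empties the stack
    have hstep : pvStepA ((l.take b).foldl pvStepA ([], ((r : Nat) : Int))) (l[b]'hbl) =
        ([l[b]'hbl], ((r - b : Nat) : Int)) := by
      have hlt : ∀ y ∈ ((l.take b).foldl pvStepA ([], ((r : Nat) : Int))).1, y < l[b]'hbl := by
        intro y hy
        rcases hpm y hy with h | h
        · simp at h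
        · obtain ⟨j, hj, hje⟩ := List.mem_iff_getElem.mp h
          have hjb : j < b := by
            have := hj; rw [List.length_take] at this; omega
          rw [List.getElem_take] at hje
          rw [← hje, hvb, hwl j (by omega)]
          exact (hspec j (by omega)).1 hjb
      have hbud : (((l.take b).foldl pvStepA ([], ((r : Nat) : Int))).1.length : Int) ≤
          ((l.take b).foldl pvStepA ([], ((r : Nat) : Int))).2 := by
        rw [hp2]; omega
      simp only [pvStepA]
      rw [pvPopLoop_all _ _ _ hlt hbud]
      congr 1
      rw [hp2]; push_cast; omega
    -- the chosen element is never popped afterwards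
    have hbot := foldA_bottom (l.drop (b + 1)) [] (l[b]'hbl) ((r - b : Nat) : Int) (by
      intro j hj
      by_cases hjc : j < r - b
      · right
        have hjl : b + 1 + j < l.length := by
          rw [List.length_drop] at hj; omega
        rw [List.getElem_drop]
        rw [hvb, hwl (b + 1 + j) (by omega)]
        exact (hspec (b + 1 + j) (by omega)).2
      · left; simp; omega)
    simp only [List.nil_append] at hbot
    -- decompose A's fold: prefix, chosen element, suffix
    have hsplit : l = l.take b ++ l[b]'hbl :: l.drop (b + 1) := by
      conv_lhs => rw [← List.take_append_drop b l]
      rw [List.getElem_cons_drop]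
    conv_lhs => rw [hsplit]
    rw [List.foldl_append, List.foldl_cons, hstep, hbot]
    rw [List.reverse_append]
    simp only [List.reverse_cons, List.reverse_nil, List.nil_append, List.singleton_append,
      List.take_succ_cons]
    -- unfold B's greedy step
    conv_rhs => rw [pvGo]
    rw [hw]
    simp only []
    rw [hb1, show ((b : Int) + 1) = (((b + 1 : Nat) : Nat) : Int) by push_cast; ring,
      PySem.List.slice_from_natCast]
    rw [hvb]
    congr 1
    have hkd : k ≤ (l.drop (b + 1)).length := by
      rw [List.length_drop]; omega
    have := ih (l.drop (b + 1)) hkd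
    rw [show (l.drop (b + 1)).length - k = r - b by rw [List.length_drop]; omega] at this
    exact this

theorem go_all (l : List String) : pvGo l l.length = l := by
  have h := main_lemma l.length l le_rfl
  rw [show l.length - l.length = 0 by omega] at h
  rw [← h, foldA_nonpos _ _ _ (by simp)]
  simp

-- ===== VERDICT (by name: the statement is the Claim_ definition above) =====
theorem search_biggest_combination_spec : Claim_equal_search_biggest_combination := by
  intro line keep _ hpre
  obtain ⟨hne, hkeep, _⟩ := hpre
  unfold Spec_search_biggest_combination
  unfold search_biggest_combination search_biggest_combination_alt
  simp only [PySem.List.len_eq]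
  by_cases hlt : keep < (line.length : Int)
  · -- 1 ≤ keep < len: budget is len - keep.toNat, target is keep.toNat
    have hkn : keep.toNat ≤ line.length := by omega
    have h1 : (line.length : Int) - keep = ((line.length - keep.toNat : Nat) : Int) := by
      omega
    have h2 := main_lemma keep.toNat line hkn
    rw [if_pos hlt, h1, PySem.List.slice_to _ (by omega), h2]
  · -- keep ≥ len: no pops, the whole line is kept and selected
    have hb : (line.length : Int) - keep ≤ 0 := by omega
    rw [if_neg hlt, foldA_nonpos _ _ _ hb, PySem.List.slice_to _ (by omega)]
    simp only [List.append_nil, List.reverse_reverse]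
    rw [List.take_of_length_le (by omega), go_all]
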